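-- pv_equiv track=rewrite | github.com/mpds-io/mpds-aiida | mpds_aiida/common.py | formula_to_latex
-- ===== SOURCE A (Python) =====
-- def formula_to_latex(given_string):
--     sub, output = False, ''
--     for token in given_string:
--         if token.isdigit() or token == '.':
--             if not sub:
--                 output += '_{'
--                 sub = True
--         else:
--             if sub:
--                 output += '}'
--                 sub = False
--         output += token
--     if sub:
--         output += '}'
--     return '$' + output + '$'
-- ===== SOURCE B (Python) =====
-- def formula_to_latex(given_string):
--     def is_sub(c):
--         return c.isdigit() or c == '.'
--     pieces = []
--     i, n = 0, len(given_string)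
--     while i < n:
--         k = is_sub(given_string[i])
--         j = i + 1
--         while j < n and is_sub(given_string[j]) == k:
--             j += 1
--         run = given_string[i:j]
--         pieces.append('_{' + run + '}' if k else run)
--         i = j
--     return '$' + ''.join(pieces) + '$'
-- ===== Notes on version B (the rewrite author's own statement) =====
-- stated objective: alternative
-- what changed: B segments the string into maximal runs of equal key (digit-or-dot vs other) and wraps each subscript run in underscore-brace delimiters as one piece, instead of A's character-by-character loop toggling a flag and emitting braces at transitions.
import Mathlib
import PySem

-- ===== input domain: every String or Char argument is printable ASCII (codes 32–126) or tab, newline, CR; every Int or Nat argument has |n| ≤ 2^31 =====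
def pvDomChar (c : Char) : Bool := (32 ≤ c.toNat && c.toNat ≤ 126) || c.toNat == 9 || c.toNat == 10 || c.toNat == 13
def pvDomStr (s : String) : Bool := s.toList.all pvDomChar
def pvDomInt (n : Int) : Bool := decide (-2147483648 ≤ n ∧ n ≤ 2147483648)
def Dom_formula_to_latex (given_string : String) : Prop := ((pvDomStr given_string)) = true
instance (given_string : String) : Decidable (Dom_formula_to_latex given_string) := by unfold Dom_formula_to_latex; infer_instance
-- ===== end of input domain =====

-- Equivalence of A (char-by-char loop toggling a subscript flag) and B (maximal-run
-- segmentation wrapping each digit/dot run as '_{run}'); B is an alternative decomposition,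
-- same O(n) cost. Proved equal on all printable-ASCII inputs.


-- shared by both ports: Python's `token.isdigit() or token == '.'` on one character
def pvKey (c : Char) : Bool := PySem.Chars.isdigit c || c == '.'

-- ===== PORT A =====
-- the body of A's for-loop, state = (sub, output); output as List Char (PySem.Chars convention)
def stepA (st : Bool × List Char) (token : Char) : Bool × List Char :=
  let st :=
    if pvKey token then
      if !st.1 then (true, st.2 ++ ['_', '{']) else st
    else
      if st.1 then (false, st.2 ++ ['}']) else st
  (st.1, st.2 ++ [token])

def formula_to_latex (given_string : String) : String :=
  let r := given_string.toList.foldl stepA (false, [])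
  let output := if r.1 then r.2 ++ ['}'] else r.2
  String.ofList ('$' :: output ++ ['$'])

-- ===== PORT B =====
-- B: split into maximal runs of equal key, wrap subscript runs, concatenate
def bGo : List Char → List Char
  | [] => []
  | c :: cs =>
    let k := pvKey c
    let run := c :: cs.takeWhile (fun d => pvKey d == k)
    let rest := cs.dropWhile (fun d => pvKey d == k)
    (if k then ['_', '{'] ++ run ++ ['}'] else run) ++ bGo rest
termination_by l => l.length
decreasing_by
  simp only [List.length_cons]
  exact Nat.lt_succ_of_le (List.length_dropWhile_le _ _)

def formula_to_latex_alt (given_string : String) : String :=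
  String.ofList ('$' :: bGo given_string.toList ++ ['$'])

-- ===== PRECONDITION & SPEC =====
def Spec_formula_to_latex (given_string : String) (out : String) : Prop := out = formula_to_latex_alt given_string
instance (given_string : String) (out : String) : Decidable (Spec_formula_to_latex given_string out) := by unfold Spec_formula_to_latex; infer_instance

-- ===== CLAIM (what is proved, stated in full; the proofs are below) =====
def Claim_equal_formula_to_latex : Prop := ∀ (given_string : String), Dom_formula_to_latex given_string → Spec_formula_to_latex given_string (formula_to_latex given_string)

-- ===== LEMMAS AND PROOFS =====

-- what A's loop (plus the final closing brace) emits after the already-built output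
def emitA (s : Bool) : List Char → List Char
  | [] => if s then ['}'] else []
  | c :: cs =>
    if pvKey c then
      (if !s then ['_', '{'] else []) ++ c :: emitA true cs
    else
      (if s then ['}'] else []) ++ c :: emitA false cs

theorem foldl_stepA_emitA (l : List Char) (s : Bool) (out : List Char) :
    (let r := l.foldl stepA (s, out)
     if r.1 then r.2 ++ ['}'] else r.2) = out ++ emitA s l := by
  induction l generalizing s out with
  | nil => cases s <;> simp [emitA]
  | cons c cs ih =>
    simp only [List.foldl_cons, emitA]
    by_cases hk : pvKey c
    · cases s <;> simp [stepA, hk, ih]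
    · cases s <;> simp [stepA, hk, ih]

theorem emitA_true_run (run rest : List Char)
    (hrun : ∀ c ∈ run, pvKey c = true)
    (hrest : rest = [] ∨ ∃ d ds, rest = d :: ds ∧ pvKey d = false) :
    emitA true (run ++ rest) = run ++ '}' :: emitA false rest := by
  induction run with
  | nil =>
    rcases hrest with h | ⟨d, ds, h, hd⟩
    · simp [h, emitA]
    · simp [h, emitA, hd]
  | cons c cs ih =>
    have hc := hrun c (by simp)
    simp [emitA, hc, ih (fun x hx => hrun x (by simp [hx]))]

theorem emitA_false_run (run rest : List Char)
    (hrun : ∀ c ∈ run, pvKey c = false) :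
    emitA false (run ++ rest) = run ++ emitA false rest := by
  induction run with
  | nil => simp
  | cons c cs ih =>
    have hc := hrun c (by simp)
    simp [emitA, hc, ih (fun x hx => hrun x (by simp [hx]))]

theorem dropWhile_head_false (p : Char → Bool) (l : List Char) (d : Char) (ds : List Char)
    (h : l.dropWhile p = d :: ds) : p d = false := by
  have := List.head_dropWhile_not p (l := l) (by simp [h])
  simp [h] at this
  simpa using this

theorem emitA_eq_bGo_aux (n : Nat) : ∀ l : List Char, l.length ≤ n → emitA false l = bGo l := by
  induction n with
  | zero =>
    intro l hl
    have : l = [] := List.eq_nil_of_length_eq_zero (Nat.le_zero.mp hl)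
    subst this; simp [emitA, bGo]
  | succ n ih =>
    intro l hl
    cases l with
    | nil => simp [emitA, bGo]
    | cons c cs =>
      rw [bGo]
      have hsplit : cs = cs.takeWhile (fun d => pvKey d == pvKey c)
          ++ cs.dropWhile (fun d => pvKey d == pvKey c) :=
        (List.takeWhile_append_dropWhile).symm
      have htake : ∀ x ∈ cs.takeWhile (fun d => pvKey d == pvKey c), pvKey x = pvKey c := by
        intro x hx
        simpa using List.mem_takeWhile_imp hx
      have hrec : emitA false (cs.dropWhile (fun d => pvKey d == pvKey c))
          = bGo (cs.dropWhile (fun d => pvKey d == pvKey c)) := by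
        apply ih
        calc (cs.dropWhile (fun d => pvKey d == pvKey c)).length
            ≤ cs.length := List.length_dropWhile_le _ _
          _ ≤ n := by simpa using Nat.lt_succ_iff.mp (by simpa using hl)
      have hhead : cs.dropWhile (fun d => pvKey d == pvKey c) = []
          ∨ ∃ d ds, cs.dropWhile (fun d => pvKey d == pvKey c) = d :: ds
              ∧ (pvKey d == pvKey c) = false := by
        cases h : cs.dropWhile (fun d => pvKey d == pvKey c) with
        | nil => exact Or.inl rfl
        | cons d ds => exact Or.inr ⟨d, ds, rfl, dropWhile_head_false _ _ _ _ h⟩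
      by_cases hk : pvKey c = true
      · simp only [hk, beq_true] at hsplit htake hrec hhead ⊢
        conv_lhs => rw [show (c :: cs) = c :: (cs.takeWhile (fun d => pvKey d)
            ++ cs.dropWhile (fun d => pvKey d)) from by rw [← hsplit]]
        simp only [emitA, hk, Bool.not_false, if_pos]
        rw [emitA_true_run _ _ (fun x hx => htake x hx)
            (by rcases hhead with h | ⟨d, ds, h, hd⟩
                · exact Or.inl h
                · exact Or.inr ⟨d, ds, h, by simpa using hd⟩)]
        simp [hrec]
      · replace hk : pvKey c = false := Bool.not_eq_true _ ▸ (by simpa using hk)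
        simp only [hk, beq_false] at hsplit htake hrec hhead ⊢
        conv_lhs => rw [show (c :: cs) = c :: (cs.takeWhile (fun d => !pvKey d)
            ++ cs.dropWhile (fun d => !pvKey d)) from by rw [← hsplit]]
        simp only [emitA, hk]
        rw [emitA_false_run _ _ (fun x hx => by simpa using htake x hx)]
        simp [hrec]

theorem emitA_eq_bGo (l : List Char) : emitA false l = bGo l :=
  emitA_eq_bGo_aux l.length l (le_refl _)

-- ===== VERDICT (by name: the statement is the Claim_ definition above) =====
theorem formula_to_latex_spec : Claim_equal_formula_to_latex := by
  intro s _
  unfold Spec_formula_to_latex formula_to_latex formula_to_latex_alt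
  have h := foldl_stepA_emitA s.toList false []
  simp only [List.nil_append] at h
  simp only [h, emitA_eq_bGo]
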